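-- pv_equiv track=rewrite | github.com/zhouchanghai/problem_ans | codility/2016Vanadium.py | solution
-- ===== SOURCE A (Python) =====
-- def solution(S):
--     segs = [0] * 1024
--     good = [0,1,2,4,8,16,32,64,128,256,512]
--     result = 0
--     m = 1000000007
--     mask = 0
--     for ch in S:
--         color = ord(ch)-ord('0')
--         mask ^= (1<<color)
--         #original index ^ mask = current index
--         #current index ^ mask = original index
--         segs[(1<<color) ^ mask] += 1
--         for index in good:
--             result = (result + segs[index ^ mask]) % m
--     return result
-- ===== SOURCE B (Python) =====
-- def solution(S):
--     m = 1000000007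
--     result = 0
--     for i in range(len(S)):
--         mask = 0
--         for ch in S[i:]:
--             mask ^= 1 << int(ch)
--             if mask & (mask - 1) == 0:
--                 result = (result + 1) % m
--     return result
-- ===== Notes on version B (the rewrite author's own statement) =====
-- stated objective: alternative
-- what changed: Replaces A's single pass over a 1024-slot prefix-parity table by a brute-force double loop over start positions that maintains a running parity bitmask and counts a substring whenever the mask has at most one set bit (mask & (mask-1) == 0).
import Mathlib
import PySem

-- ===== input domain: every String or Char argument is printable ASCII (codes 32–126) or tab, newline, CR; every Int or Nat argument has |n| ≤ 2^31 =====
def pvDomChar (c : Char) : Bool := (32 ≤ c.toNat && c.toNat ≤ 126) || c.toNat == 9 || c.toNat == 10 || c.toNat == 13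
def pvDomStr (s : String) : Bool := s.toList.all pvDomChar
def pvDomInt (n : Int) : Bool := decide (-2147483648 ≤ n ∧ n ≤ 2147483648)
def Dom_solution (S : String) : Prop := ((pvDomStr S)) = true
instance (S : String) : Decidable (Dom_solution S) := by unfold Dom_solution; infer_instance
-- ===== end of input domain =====

-- B replaces A's single prefix-parity-table pass by a brute-force double loop over start positions.

-- ===== PORT A =====
-- the list 'good = [0,1,2,4,8,16,32,64,128,256,512]' of A
def goodA : List Nat := [0, 1, 2, 4, 8, 16, 32, 64, 128, 256, 512]

-- inner 'for index in good' loop: result = (result + segs[index ^ mask]) % m; none = IndexError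
def innerA (segs : List Int) (mask : Nat) : List Nat → Int → Option Int
  | [], r => some r
  | idx :: rest, r =>
    match PySem.List.pyGet? segs ((idx ^^^ mask : Nat) : Int) with
    | none => none
    | some v => innerA segs mask rest (PySem.Int.mod (r + v) 1000000007)

-- one iteration of 'for ch in S'; none = ValueError (1 << negative) or IndexError (segs index ≥ 1024)
def stepA (st : Option (List Int × Int × Nat)) (ch : Char) : Option (List Int × Int × Nat) :=
  match st with
  | none => none
  | some (segs, r, mask) =>
    let color : Int := (ch.toNat : Int) - 48
    if color < 0 then none
    else
      let bit : Nat := 1 <<< color.toNat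
      let mask' := mask ^^^ bit
      match PySem.List.pyGet? segs ((bit ^^^ mask' : Nat) : Int) with
      | none => none
      | some v =>
        match innerA (segs.set (bit ^^^ mask') (v + 1)) mask' goodA r with
        | none => none
        | some r' => some (segs.set (bit ^^^ mask') (v + 1), r', mask')

def solution (S : String) : Int :=
  match S.toList.foldl stepA (some (List.replicate 1024 0, 0, 0)) with
  | some (_, r, _) => r
  | none => 0

-- ===== PORT B =====
-- inner 'for ch in S[i:]' loop of B; none = ValueError from int(ch) on a non-digit
def innerB : List Char → Nat → Int → Option Int
  | [], _, r => some r
  | c :: cs, mask, r =>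
    match PySem.Int.ofChars? [c] with
    | none => none
    | some d =>
      let mask' := mask ^^^ (1 <<< d.toNat)
      innerB cs mask' (if mask' &&& (mask' - 1) == 0 then PySem.Int.mod (r + 1) 1000000007 else r)

-- outer 'for i in range(len(S))' loop: the i-th iteration scans the i-th suffix S[i:]
def outerB : List Char → Int → Option Int
  | [], r => some r
  | c :: cs, r =>
    match innerB (c :: cs) 0 r with
    | none => none
    | some r' => outerB cs r'

def solution_alt (S : String) : Int := (outerB S.toList 0).getD 0

-- ===== PRECONDITION & SPEC =====
-- Pre_: all characters are decimal digits — exactly the strings on which A returns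
-- (a char < '0' makes A raise ValueError, a char > '9' makes it raise IndexError).
def Pre_solution (S : String) : Prop := (S.toList.all (fun c => 48 ≤ c.toNat && c.toNat ≤ 57)) = true
instance (S : String) : Decidable (Pre_solution S) := by unfold Pre_solution; infer_instance
def pvWitness_solution : String := "020321"

def Spec_solution (S : String) (out : Int) : Prop := out = solution_alt S
instance (S : String) (out : Int) : Decidable (Spec_solution S out) := by unfold Spec_solution; infer_instance

-- ===== CLAIM (what is proved, stated in full; the proofs are below) =====
def Claim_equal_solution : Prop := ∀ (S : String), Dom_solution S → Pre_solution S → Spec_solution S (solution S)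

-- ===== LEMMAS AND PROOFS =====

-- abstract data used by the proofs
def dbit (c : Char) : Nat := 1 <<< (c.toNat - 48)
def good? (x : Nat) : Bool := x &&& (x - 1) == 0

-- the table segs as a function of the history of recorded prefix masks
def tab (hs : List Nat) : List Int :=
  hs.foldl (fun s h => s.set h (s.getD h 0 + 1)) (List.replicate 1024 (0 : Int))

-- parity masks of the nonempty prefixes of cs, starting from mask m
def pmsT (m : Nat) : List Char → List Nat
  | [] => []
  | c :: cs => (m ^^^ dbit c) :: pmsT (m ^^^ dbit c) cs

-- A's run abstracted: final history, final mask, total (un-modded) count added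
def addA (hs : List Nat) (mask : Nat) : List Char → List Nat × Nat × Nat
  | [] => (hs, mask, 0)
  | c :: cs =>
    let mask' := mask ^^^ dbit c
    let t := addA (hs ++ [mask]) mask' cs
    (t.1, t.2.1, ((hs ++ [mask]).countP (fun y => good? (y ^^^ mask'))) + t.2.2)

-- B's inner run abstracted: count of good prefixes of the suffix
def addB (mask : Nat) : List Char → Nat
  | [] => 0
  | c :: cs => (if good? (mask ^^^ dbit c) then 1 else 0) + addB (mask ^^^ dbit c) cs

def addBtot : List Char → Nat
  | [] => 0
  | c :: cs => addB 0 (c :: cs) + addBtot cs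

-- pair counts on a mask list, grouped by start
def pairsTotal : List Nat → Nat
  | [] => 0
  | x :: xs => xs.countP (fun y => good? (x ^^^ y)) + pairsTotal xs

-- pair counts grouped by end, with explicit history
def goE (hist : List Nat) : List Nat → Nat
  | [] => 0
  | x :: xs => hist.countP (fun y => good? (y ^^^ x)) + goE (hist ++ [x]) xs

theorem sum_map_add_nat (l : List Nat) (f g : Nat → Nat) :
    (l.map (fun y => f y + g y)).sum = (l.map f).sum + (l.map g).sum := by
  induction l with
  | nil => simp
  | cons a t ih => simp [ih]; omega

theorem sum_ite_countP (l : List Nat) (p : Nat → Bool) :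
    (l.map (fun y => if p y then (1 : Nat) else 0)).sum = l.countP p := by
  induction l with
  | nil => simp
  | cons a t ih => simp [List.countP_cons, ih]; omega

set_option maxRecDepth 100000 in
theorem oneHot : ∀ z, z < 1024 →
    (goodA.map (fun i => if i = z then (1 : Nat) else 0)).sum = if good? z then 1 else 0 := by
  decide

theorem goodA_lt : ∀ i ∈ goodA, i < 1024 := by decide

theorem getD_set {α : Type} (l : List α) (i x : Nat) (v d : α) (hi : i < l.length) :
    (l.set i v).getD x d = if x = i then v else l.getD x d := by
  simp only [List.getD_eq_getElem?_getD, List.getElem?_set]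
  by_cases h : x = i
  · subst h; simp [hi]
  · rw [if_neg (by omega), if_neg h]

theorem sum_counts (hs : List Nat) (mask : Nat) (hhs : ∀ h ∈ hs, h < 1024) (hm : mask < 1024) :
    (goodA.map (fun i => hs.count (i ^^^ mask))).sum = hs.countP (fun y => good? (y ^^^ mask)) := by
  induction hs with
  | nil => simp [goodA]
  | cons y t ih =>
    have hy : y < 1024 := hhs y List.mem_cons_self
    have ht : ∀ h ∈ t, h < 1024 := fun h hm' => hhs h (List.mem_cons_of_mem _ hm')
    have hym : y ^^^ mask < 1024 := by
      have := Nat.xor_lt_two_pow (n := 10) (by omega : y < 2 ^ 10) (by omega : mask < 2 ^ 10)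
      omega
    have h1 : (goodA.map (fun i => (y :: t).count (i ^^^ mask))).sum
        = (goodA.map (fun i => t.count (i ^^^ mask) + (if i = y ^^^ mask then 1 else 0))).sum := by
      apply congrArg
      apply List.map_congr_left
      intro i _
      rw [List.count_cons]
      congr 1
      by_cases h : i ^^^ mask = y
      · have hi : i = y ^^^ mask := by rw [← h, Nat.xor_xor_cancel_right]
        simp [hi]
      · have hi : ¬ i = y ^^^ mask := fun hh => h (by rw [hh, Nat.xor_xor_cancel_right])
        have hy' : ¬ y = i ^^^ mask := fun hh => h hh.symm
        simp [hi, hy']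
    rw [h1, sum_map_add_nat, ih ht, oneHot (y ^^^ mask) hym, List.countP_cons]

theorem length_tab_aux (hs : List Nat) :
    ∀ s : List Int, (hs.foldl (fun s h => s.set h (s.getD h 0 + 1)) s).length = s.length := by
  induction hs with
  | nil => intro s; rfl
  | cons a t ih => intro s; rw [List.foldl_cons, ih, List.length_set]

theorem length_tab (hs : List Nat) : (tab hs).length = 1024 := by
  rw [tab, length_tab_aux, List.length_replicate]

theorem tab_append (hs : List Nat) (h : Nat) :
    tab (hs ++ [h]) = (tab hs).set h ((tab hs).getD h 0 + 1) := by
  rw [tab, List.foldl_append]; rfl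

theorem getD_tab (hs : List Nat) (x : Nat) (hx : x < 1024) (hhs : ∀ h ∈ hs, h < 1024) :
    (tab hs).getD x 0 = (hs.count x : Int) := by
  induction hs using List.reverseRecOn with
  | nil =>
    show (List.replicate 1024 (0 : Int)).getD x 0 = _
    rw [List.getD_eq_getElem?_getD, List.getElem?_replicate, if_pos hx]
    simp
  | append_singleton hs h ih =>
    have hh : h < 1024 := hhs h (by simp)
    have hhs' : ∀ a ∈ hs, a < 1024 := fun a ha => hhs a (by simp [ha])
    by_cases hxh : x = h
    · subst hxh
      rw [tab_append, getD_set _ _ _ _ _ (by rw [length_tab]; exact hh), if_pos rfl,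
        ih hhs', List.count_append]
      simp
    · rw [tab_append, getD_set _ _ _ _ _ (by rw [length_tab]; exact hh), if_neg hxh,
        ih hhs', List.count_append]
      simp [List.count_singleton]
      omega

theorem cast_mod_add (R c : Nat) :
    PySem.Int.mod (((R % 1000000007 : Nat) : Int) + (c : Int)) 1000000007
      = (((R + c) % 1000000007 : Nat) : Int) := by
  rw [PySem.Int.mod_eq_emod_of_pos (by norm_num)]
  push_cast
  rw [Int.emod_add_emod]

theorem innerA_spec (l : List Nat) (hs : List Nat) (mask : Nat) (R : Nat)
    (hhs : ∀ h ∈ hs, h < 1024) (hl : ∀ i ∈ l, i ^^^ mask < 1024) :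
    innerA (tab hs) mask l ((R % 1000000007 : Nat) : Int)
      = some (((R + (l.map (fun i => hs.count (i ^^^ mask))).sum) % 1000000007 : Nat) : Int) := by
  induction l generalizing R with
  | nil => simp [innerA]
  | cons i rest ih =>
    have hi : i ^^^ mask < 1024 := hl i List.mem_cons_self
    have hg : PySem.List.pyGet? (tab hs) ((i ^^^ mask : Nat) : Int)
        = some ((hs.count (i ^^^ mask) : Int)) := by
      have hlen : i ^^^ mask < (tab hs).length := by rw [length_tab]; exact hi
      have : (tab hs)[i ^^^ mask]'hlen = ((hs.count (i ^^^ mask) : Nat) : Int) := by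
        rw [← List.getD_eq_getElem (tab hs) 0 hlen, getD_tab hs _ hi hhs]
      simp [hlen, this]
    rw [innerA, hg]
    simp only [cast_mod_add]
    rw [ih (R + hs.count (i ^^^ mask)) (fun j hj => hl j (List.mem_cons_of_mem _ hj))]
    rw [List.map_cons, List.sum_cons, Nat.add_assoc]

theorem A_loop (cs : List Char) (hs : List Nat) (mask : Nat) (R : Nat)
    (hd : ∀ c ∈ cs, 48 ≤ c.toNat ∧ c.toNat ≤ 57)
    (hm : mask < 1024) (hhs : ∀ h ∈ hs, h < 1024) :
    List.foldl stepA (some (tab hs, ((R % 1000000007 : Nat) : Int), mask)) cs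
      = some (tab (addA hs mask cs).1,
              (((R + (addA hs mask cs).2.2) % 1000000007 : Nat) : Int),
              (addA hs mask cs).2.1) := by
  induction cs generalizing hs mask R with
  | nil => simp [addA]
  | cons c cs ih =>
    have h48 : 48 ≤ c.toNat ∧ c.toNat ≤ 57 := hd c List.mem_cons_self
    have hd' : ∀ a ∈ cs, 48 ≤ a.toNat ∧ a.toNat ≤ 57 := fun a ha => hd a (List.mem_cons_of_mem _ ha)
    have htn : ((c.toNat : Int) - 48).toNat = c.toNat - 48 := by omega
    have hbit : (1 : Nat) <<< ((c.toNat : Int) - 48).toNat = dbit c := by rw [htn]; rfl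
    have hdb : dbit c < 1024 := by
      have h9 : c.toNat - 48 ≤ 9 := by omega
      have : (2 : Nat) ^ (c.toNat - 48) ≤ 2 ^ 9 := Nat.pow_le_pow_right (by norm_num) h9
      unfold dbit; rw [Nat.shiftLeft_eq, Nat.one_mul]; omega
    have hm' : mask ^^^ dbit c < 1024 := by
      have := Nat.xor_lt_two_pow (n := 10) (by omega : mask < 2 ^ 10) (by omega : dbit c < 2 ^ 10)
      omega
    have hidx : dbit c ^^^ (mask ^^^ dbit c) = mask := by
      rw [Nat.xor_comm mask (dbit c), Nat.xor_xor_cancel_left]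
    have hg : PySem.List.pyGet? (tab hs) ((dbit c ^^^ (mask ^^^ dbit c) : Nat) : Int)
        = some ((hs.count mask : Int)) := by
      have hlen : mask < (tab hs).length := by rw [length_tab]; exact hm
      have : (tab hs)[mask]'hlen = ((hs.count mask : Nat) : Int) := by
        rw [← List.getD_eq_getElem (tab hs) 0 hlen, getD_tab hs _ hm hhs]
      rw [hidx]; simp [hlen, this]
    have hset : (tab hs).set (dbit c ^^^ (mask ^^^ dbit c)) ((hs.count mask : Int) + 1)
        = tab (hs ++ [mask]) := by
      rw [hidx, tab_append, getD_tab hs mask hm hhs]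
    have hhs' : ∀ h ∈ hs ++ [mask], h < 1024 := by
      intro h hmem
      rcases List.mem_append.mp hmem with h1 | h1
      · exact hhs h h1
      · simp at h1; omega
    have hgoods : ∀ i ∈ goodA, i ^^^ (mask ^^^ dbit c) < 1024 := by
      intro i hi
      have := Nat.xor_lt_two_pow (n := 10) (by have := goodA_lt i hi; omega : i < 2 ^ 10)
        (by omega : mask ^^^ dbit c < 2 ^ 10)
      omega
    have hinner := innerA_spec goodA (hs ++ [mask]) (mask ^^^ dbit c) R hhs' hgoods
    rw [sum_counts (hs ++ [mask]) (mask ^^^ dbit c) hhs' hm'] at hinner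
    rw [List.foldl_cons]
    have hstep : stepA (some (tab hs, ((R % 1000000007 : Nat) : Int), mask)) c
        = some (tab (hs ++ [mask]),
            (((R + (hs ++ [mask]).countP (fun y => good? (y ^^^ (mask ^^^ dbit c)))) % 1000000007 : Nat) : Int),
            mask ^^^ dbit c) := by
      rw [stepA]
      simp only [if_neg (by omega : ¬ ((c.toNat : Int) - 48 < 0)), hbit]
      rw [hg]
      simp only [hset, hinner]
    rw [hstep, ih (hs ++ [mask]) (mask ^^^ dbit c) _ hd' hm' hhs']
    show _ = some (tab (addA hs mask (c :: cs)).1, _, (addA hs mask (c :: cs)).2.1)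
    simp only [addA, Nat.add_assoc]

theorem ofChars_digit (c : Char) (h1 : 48 ≤ c.toNat) (h2 : c.toNat ≤ 57) :
    PySem.Int.ofChars? [c] = some ((c.toNat : Int) - 48) := by
  have hc : Char.ofNat c.toNat = c := Char.ofNat_toNat c
  set n := c.toNat with hn
  rw [← hc]
  interval_cases n <;> decide

theorem innerB_spec (cs : List Char) (mask : Nat) (R : Nat)
    (hd : ∀ c ∈ cs, 48 ≤ c.toNat ∧ c.toNat ≤ 57) :
    innerB cs mask ((R % 1000000007 : Nat) : Int)
      = some (((R + addB mask cs) % 1000000007 : Nat) : Int) := by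
  induction cs generalizing mask R with
  | nil => simp [innerB, addB]
  | cons c cs ih =>
    obtain ⟨h48, h57⟩ := hd c List.mem_cons_self
    have hd' : ∀ a ∈ cs, 48 ≤ a.toNat ∧ a.toNat ≤ 57 := fun a ha => hd a (List.mem_cons_of_mem _ ha)
    have htn : ((c.toNat : Int) - 48).toNat = c.toNat - 48 := by omega
    rw [innerB, ofChars_digit c h48 h57]
    simp only [htn]
    show innerB cs (mask ^^^ dbit c) _ = _
    by_cases hgd : good? (mask ^^^ dbit c)
    · rw [if_pos (by exact hgd)]
      have h1 : PySem.Int.mod (((R % 1000000007 : Nat) : Int) + 1) 1000000007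
          = (((R + 1) % 1000000007 : Nat) : Int) := by
        simpa using cast_mod_add R 1
      rw [h1, ih (mask ^^^ dbit c) (R + 1) hd']
      rw [addB, if_pos hgd, Nat.add_comm 1 (addB _ cs), ← Nat.add_assoc, Nat.add_comm (R + 1) _]
      rw [Nat.add_comm (addB _ cs) (R + 1), Nat.add_assoc, Nat.add_comm 1 (addB _ cs), ← Nat.add_assoc]
    · rw [if_neg (by exact hgd), ih (mask ^^^ dbit c) R hd']
      rw [addB, if_neg hgd, Nat.zero_add]

theorem outerB_spec (cs : List Char) (R : Nat) (hd : ∀ c ∈ cs, 48 ≤ c.toNat ∧ c.toNat ≤ 57) :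
    outerB cs ((R % 1000000007 : Nat) : Int)
      = some (((R + addBtot cs) % 1000000007 : Nat) : Int) := by
  induction cs generalizing R with
  | nil => simp [outerB, addBtot]
  | cons c cs ih =>
    rw [outerB, innerB_spec (c :: cs) 0 R hd]
    show outerB cs (((R + addB 0 (c :: cs)) % 1000000007 : Nat) : Int) = _
    rw [ih (R + addB 0 (c :: cs)) (fun a ha => hd a (List.mem_cons_of_mem _ ha)),
      addBtot, Nat.add_assoc]

theorem countP_pmsT (t : List Char) : ∀ m r : Nat,
    (pmsT m t).countP (fun y => good? (r ^^^ y)) = addB (r ^^^ m) t := by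
  induction t with
  | nil => intro m r; simp [pmsT, addB]
  | cons c cs ih =>
    intro m r
    rw [pmsT, List.countP_cons, ih (m ^^^ dbit c) r, addB, ← Nat.xor_assoc]
    omega

theorem addBtot_pairs (cs : List Char) : ∀ m : Nat,
    addBtot cs = pairsTotal (m :: pmsT m cs) := by
  induction cs with
  | nil => intro m; simp [pmsT, pairsTotal, addBtot]
  | cons c cs ih =>
    intro m
    rw [addBtot, pairsTotal, pmsT]
    have h1 : ((m ^^^ dbit c) :: pmsT (m ^^^ dbit c) cs).countP (fun y => good? (m ^^^ y))
        = addB 0 (c :: cs) := by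
      have := countP_pmsT (c :: cs) m m
      rw [pmsT] at this
      rw [this, Nat.xor_self]
    rw [h1, ← ih (m ^^^ dbit c)]

theorem addA_goE (cs : List Char) : ∀ (hs : List Nat) (mask : Nat),
    (addA hs mask cs).2.2 = goE (hs ++ [mask]) (pmsT mask cs) := by
  induction cs with
  | nil => intro hs mask; simp [addA, pmsT, goE]
  | cons c cs ih =>
    intro hs mask
    rw [pmsT, goE, addA]
    simp only []
    rw [ih (hs ++ [mask]) (mask ^^^ dbit c)]

theorem goE_swap (l : List Nat) : ∀ hist : List Nat,
    goE hist l = (hist.map (fun y => l.countP (fun z => good? (y ^^^ z)))).sum + pairsTotal l := by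
  induction l with
  | nil => intro hist; simp [goE, pairsTotal]
  | cons x xs ih =>
    intro hist
    rw [goE, ih (hist ++ [x]), pairsTotal]
    rw [List.map_append, List.sum_append]
    have h1 : (hist.map (fun y => (x :: xs).countP (fun z => good? (y ^^^ z)))).sum
        = (hist.map (fun y => (if good? (y ^^^ x) then (1 : Nat) else 0) + xs.countP (fun z => good? (y ^^^ z)))).sum := by
      apply congrArg; apply List.map_congr_left; intro y _
      rw [List.countP_cons]; omega
    rw [h1, sum_map_add_nat, sum_ite_countP]
    simp
    omega

theorem totals_eq (cs : List Char) : (addA [] 0 cs).2.2 = addBtot cs := by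
  rw [addA_goE cs [] 0, List.nil_append, goE_swap, addBtot_pairs cs 0, pairsTotal]
  simp

-- ===== VERDICT (by name: the statement is the Claim_ definition above) =====
theorem solution_spec : Claim_equal_solution := by
  intro S _ hPre
  unfold Pre_solution at hPre
  unfold Spec_solution solution solution_alt
  have hd : ∀ c ∈ S.toList, 48 ≤ c.toNat ∧ c.toNat ≤ 57 := by
    simp only [List.all_eq_true, Bool.and_eq_true, decide_eq_true_eq] at hPre
    exact hPre
  have h0 : (List.replicate 1024 (0 : Int)) = tab [] := rfl
  have hz : (0 : Int) = (((0 % 1000000007 : Nat)) : Int) := by norm_num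
  rw [h0, hz, A_loop S.toList [] 0 0 hd (by norm_num) (by simp)]
  rw [outerB_spec S.toList 0 hd]
  simp only [Option.getD_some, Nat.zero_add]
  rw [totals_eq]
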